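-- pv_equiv track=rewrite | github.com/adrcanfer/reconfigurable-circuits | Estructura de datos.py | estructura_circuito
-- ===== SOURCE A (Python) =====
-- def estructura_circuito(m,n, programacionPuertas, inputs):
--     estructura = []
--     for i in range (m):
--         puertas = [];
--         for j in range(n):
--             puertas.append([programacionPuertas[(i*n)+j], inputs[(i*n)+j]]);
--         estructura.append(puertas);
--     return estructura;
-- ===== SOURCE B (Python) =====
-- def estructura_circuito(m, n, programacionPuertas, inputs):
--     if n <= 0:
--         return [[] for _ in range(m)]
--     total = m * n
--     pares = [[g, x] for g, x in zip(programacionPuertas[:total], inputs[:total])]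
--     return [pares[i * n:(i + 1) * n] for i in range(m)]
-- ===== Notes on version B (the rewrite author's own statement) =====
-- stated objective: alternative
-- what changed: B replaces A's nested row/column index loops by a flatten-then-chunk decomposition: it zips the two lists once into a flat list of [gate, input] pairs and then slices that list into m rows of width n.
import Mathlib
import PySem

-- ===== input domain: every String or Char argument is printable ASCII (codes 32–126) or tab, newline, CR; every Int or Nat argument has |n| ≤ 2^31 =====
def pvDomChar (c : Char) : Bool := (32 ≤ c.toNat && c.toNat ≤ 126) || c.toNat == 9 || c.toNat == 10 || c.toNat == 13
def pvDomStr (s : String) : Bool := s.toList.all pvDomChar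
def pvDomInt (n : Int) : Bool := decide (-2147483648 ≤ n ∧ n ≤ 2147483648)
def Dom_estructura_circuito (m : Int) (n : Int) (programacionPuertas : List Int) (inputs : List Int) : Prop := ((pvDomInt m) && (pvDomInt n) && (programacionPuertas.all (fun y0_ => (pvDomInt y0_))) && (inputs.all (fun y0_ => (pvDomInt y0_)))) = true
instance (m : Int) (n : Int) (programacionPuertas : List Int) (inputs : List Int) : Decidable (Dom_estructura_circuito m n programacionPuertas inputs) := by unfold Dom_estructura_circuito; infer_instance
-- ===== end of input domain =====

-- B reshapes by zipping the two lists into one flat list of pairs and chunking it into rows of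
-- width n, instead of A's nested row/column index loops (alternative decomposition, same cost).

-- ===== PORT A =====
-- xs[(i*n)+j] is in range on every input Pre_ admits; pyGetD is exact there.
def estructura_circuito (m : Int) (n : Int) (programacionPuertas : List Int) (inputs : List Int) : List (List (List Int)) :=
  (PySem.List.pyRange 0 m 1).foldl (fun estructura i =>
    estructura ++ [(PySem.List.pyRange 0 n 1).foldl (fun puertas j =>
      puertas ++ [[PySem.List.pyGetD programacionPuertas (i * n + j) 0,
                   PySem.List.pyGetD inputs (i * n + j) 0]]) []]) []

-- ===== PORT B =====
def estructura_circuito_alt (m : Int) (n : Int) (programacionPuertas : List Int) (inputs : List Int) : List (List (List Int)) :=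
  if n ≤ 0 then
    (PySem.List.pyRange 0 m 1).map (fun _ => [])
  else
    let total := m * n
    let pares := List.zipWith (fun g x => [g, x])
      (PySem.List.slice programacionPuertas none (some total))
      (PySem.List.slice inputs none (some total))
    (PySem.List.pyRange 0 m 1).map (fun i =>
      PySem.List.slice pares (some (i * n)) (some ((i + 1) * n)))

-- ===== PRECONDITION & SPEC =====
-- Pre_ excludes exactly the inputs on which A raises IndexError: positive grid dimensions whose
-- m*n entries exceed one of the two lists.
def Pre_estructura_circuito (m : Int) (n : Int) (programacionPuertas : List Int) (inputs : List Int) : Prop :=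
  0 < m → 0 < n → (m * n ≤ (programacionPuertas.length : Int) ∧ m * n ≤ (inputs.length : Int))
instance (m : Int) (n : Int) (programacionPuertas : List Int) (inputs : List Int) : Decidable (Pre_estructura_circuito m n programacionPuertas inputs) := by unfold Pre_estructura_circuito; infer_instance
def pvWitness_estructura_circuito : Int × Int × List Int × List Int := (2, 2, [1, 2, 3, 4], [5, 6, 7, 8])


def Spec_estructura_circuito (m : Int) (n : Int) (programacionPuertas : List Int) (inputs : List Int) (out : List (List (List Int))) : Prop := out = estructura_circuito_alt m n programacionPuertas inputs
instance (m : Int) (n : Int) (programacionPuertas : List Int) (inputs : List Int) (out : List (List (List Int))) : Decidable (Spec_estructura_circuito m n programacionPuertas inputs out) := by unfold Spec_estructura_circuito; infer_instance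

-- ===== CLAIM (what is proved, stated in full; the proofs are below) =====
def Claim_equal_estructura_circuito : Prop := ∀ (m : Int) (n : Int) (programacionPuertas : List Int) (inputs : List Int), Dom_estructura_circuito m n programacionPuertas inputs → Pre_estructura_circuito m n programacionPuertas inputs → Spec_estructura_circuito m n programacionPuertas inputs (estructura_circuito m n programacionPuertas inputs)

-- ===== LEMMAS AND PROOFS =====

-- One row of A equals the corresponding slice of the flat pair list.
lemma pv_row (pp ii : List Int) (n i t : Int) (hn : 0 < n) (hi : 0 ≤ i)
    (ht : (i + 1) * n ≤ t) (htpp : t ≤ (pp.length : Int)) (htii : t ≤ (ii.length : Int)) :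
    (PySem.List.pyRange 0 n 1).map
        (fun j => [PySem.List.pyGetD pp (i * n + j) 0, PySem.List.pyGetD ii (i * n + j) 0])
      = PySem.List.slice (List.zipWith (fun g x => [g, x]) (pp.take t.toNat) (ii.take t.toNat))
          (some (i * n)) (some ((i + 1) * n)) := by
  have hin : 0 ≤ i * n := mul_nonneg hi (le_of_lt hn)
  have hi1n : 0 ≤ (i + 1) * n := mul_nonneg (by omega) (le_of_lt hn)
  have hlenz : (List.zipWith (fun g x : Int => [g, x]) (pp.take t.toNat) (ii.take t.toNat)).length = t.toNat := by
    simp [List.length_zipWith]; omega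
  rw [PySem.List.slice_toNat _ hin hi1n]
  have hsum : ((i + 1) * n).toNat = (i * n).toNat + n.toNat := by
    have : (i + 1) * n = i * n + n := by ring
    omega
  apply List.ext_getElem
  · simp [PySem.List.length_pyRange_one, hlenz]; omega
  · intro k h1 h2
    simp only [List.getElem_map, PySem.List.getElem_pyRange_one, List.getElem_take,
      List.getElem_drop, List.getElem_zipWith]
    have hk : (k : Int) < n := by
      simp [PySem.List.length_pyRange_one] at h1; omega
    have hidx : 0 ≤ i * n + (0 + (k : Int)) := by omega
    have hidxpp : i * n + (0 + (k : Int)) < (pp.length : Int) := by nlinarith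
    have hidxii : i * n + (0 + (k : Int)) < (ii.length : Int) := by nlinarith
    rw [PySem.List.pyGetD_eq_getElem _ _ hidx hidxpp,
        PySem.List.pyGetD_eq_getElem _ _ hidx hidxii]
    have hEq : (i * n + (0 + (k : Int))).toNat = (i * n).toNat + k := by omega
    simp only [hEq]

lemma pv_main (m n : Int) (pp ii : List Int) (hpre : Pre_estructura_circuito m n pp ii) :
    estructura_circuito m n pp ii = estructura_circuito_alt m n pp ii := by
  simp only [estructura_circuito, estructura_circuito_alt,
    PySem.List.foldl_append_singleton_eq_map]
  by_cases hn : n ≤ 0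
  · simp [hn, PySem.List.pyRange_one_eq_nil (by omega : n ≤ 0)]
  · rw [not_le] at hn
    simp only [if_neg (by omega : ¬ n ≤ 0)]
    by_cases hm : m ≤ 0
    · simp [PySem.List.pyRange_one_eq_nil (by omega : m ≤ 0)]
    · rw [not_le] at hm
      obtain ⟨hpp, hii⟩ := hpre hm hn
      have h0 : 0 ≤ m * n := mul_nonneg (by omega) (by omega)
      rw [PySem.List.slice_to _ h0, PySem.List.slice_to _ h0]
      apply List.map_congr_left
      intro i hiMem
      have hi := (PySem.List.mem_pyRange_one).mp hiMem
      exact pv_row pp ii n i (m * n) hn hi.1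
        (mul_le_mul_of_nonneg_right (by omega) (by omega)) hpp hii

-- ===== VERDICT (by name: the statement is the Claim_ definition above) =====
theorem estructura_circuito_spec : Claim_equal_estructura_circuito := by
  intro m n pp ii _ hpre
  exact pv_main m n pp ii hpre
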